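-- pv_equiv track=rewrite | github.com/jw9603/CodeTree | 250405/격자 숫자 놀이/matrix-number-play.py | operate_r
-- ===== SOURCE A (Python) =====
-- from collections import Counter
--
-- def operate_r(grid):
--     max_len = 0
--     new_grid = []
--
--     for row in grid:
--         counter = sorted(Counter([num for num in row if num != 0]).items(), key=lambda x: (x[1], x[0]))
--         sorted_row = []
--         for num, cnt in counter:
--             sorted_row.extend([num, cnt])
--
--         new_grid.append(sorted_row)
--         max_len = max(max_len, len(sorted_row))
--
--     for row in new_grid:
--         while len(row) < max_len:
--             row.append(0)
--         row[:] = row[:100]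
--
--     return new_grid
-- ===== SOURCE B (Python) =====
-- def _runs(vals):
--     # runs of equal values over an already-sorted list -> (value, run length) pairs
--     pairs = []
--     while vals:
--         v = vals[0]
--         k = 1
--         while k < len(vals) and vals[k] == v:
--             k += 1
--         pairs.append((v, k))
--         vals = vals[k:]
--     return pairs
--
--
-- def _row_transform(row):
--     vals = sorted([v for v in row if v != 0])
--     pairs = sorted(_runs(vals), key=lambda p: (p[1], p[0]))
--     return [x for p in pairs for x in p]
--
--
-- def operate_r(grid):
--     new_grid = [_row_transform(row) for row in grid]
--     max_len = max([len(r) for r in new_grid], default=0)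
--     return [(r + [0] * (max_len - len(r)))[:100] for r in new_grid]
-- ===== Notes on version B (the rewrite author's own statement) =====
-- stated objective: alternative
-- what changed: Per-row counting is done by sort-then-group-runs over the non-zero values (emitting (value,count) pairs from runs of equal elements) instead of Counter hash accumulation, and the pad/truncate pass is a pure comprehension instead of in-place while-append mutation.
import Mathlib
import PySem

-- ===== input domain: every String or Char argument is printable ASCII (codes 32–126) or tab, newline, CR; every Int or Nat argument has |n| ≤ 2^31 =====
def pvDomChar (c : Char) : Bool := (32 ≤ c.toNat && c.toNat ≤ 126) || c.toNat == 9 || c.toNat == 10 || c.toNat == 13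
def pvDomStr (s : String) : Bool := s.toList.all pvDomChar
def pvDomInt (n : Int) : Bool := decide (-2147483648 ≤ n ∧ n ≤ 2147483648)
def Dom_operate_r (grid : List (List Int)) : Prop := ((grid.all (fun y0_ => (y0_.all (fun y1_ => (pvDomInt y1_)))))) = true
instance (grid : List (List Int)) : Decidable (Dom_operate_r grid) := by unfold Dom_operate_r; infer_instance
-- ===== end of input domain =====

-- B re-implements the per-row counting by sort-then-group-runs instead of Counter hash
-- accumulation, and pads/truncates by a pure comprehension instead of in-place mutation
-- (neither version mutates its argument); objective: alternative algorithm, same cost class.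

-- ===== PORT A =====
-- the 'while len(row) < max_len: row.append(0)' loop of A
def padTo (row : List Int) (m : Int) : List Int :=
  if PySem.List.len row < m then padTo (row ++ [0]) m else row
termination_by (m - PySem.List.len row).toNat
decreasing_by simp_all [PySem.List.len_eq]; omega

def operate_r (grid : List (List Int)) : List (List Int) :=
  let st := grid.foldl (fun (st : Int × List (List Int)) row =>
    let counter := PySem.List.sorted2
      (PySem.Dict.counter (row.filter (fun num => num != 0))).items
      (fun x => x.2) (fun x => x.1) false
    let sorted_row := counter.foldl (fun acc p => acc ++ [p.1, p.2]) ([] : List Int)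
    (max st.1 (PySem.List.len sorted_row), st.2 ++ [sorted_row])) (0, [])
  st.2.map (fun row => PySem.List.slice (padTo row st.1) none (some 100))

-- ===== PORT B =====
-- the two nested while loops of _runs: emit (value, run length) for each run of equal values
def pyRuns (vals : List Int) : List (Int × Int) :=
  match vals with
  | [] => []
  | v :: rest =>
      (v, ((rest.takeWhile (fun x => x == v)).length : Int) + 1)
        :: pyRuns (rest.dropWhile (fun x => x == v))
termination_by vals.length
decreasing_by
  simp only [List.length_cons]
  exact Nat.lt_succ_of_le (List.length_dropWhile_le _ _)

def rowTransform (row : List Int) : List Int :=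
  let vals := PySem.List.sorted (row.filter (fun v => v != 0)) (fun x => x) false
  let pairs := PySem.List.sorted2 (pyRuns vals) (fun p => p.2) (fun p => p.1) false
  pairs.flatMap (fun p => [p.1, p.2])

def operate_r_alt (grid : List (List Int)) : List (List Int) :=
  let new_grid := grid.map rowTransform
  let max_len := (new_grid.map PySem.List.len).foldl max 0
  new_grid.map (fun r =>
    PySem.List.slice (r ++ List.replicate (max_len - PySem.List.len r).toNat 0) none (some 100))

-- ===== PRECONDITION & SPEC =====
def Spec_operate_r (grid : List (List Int)) (out : List (List Int)) : Prop := out = operate_r_alt grid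
instance (grid : List (List Int)) (out : List (List Int)) : Decidable (Spec_operate_r grid out) := by unfold Spec_operate_r; infer_instance

-- ===== CLAIM (what is proved, stated in full; the proofs are below) =====
def Claim_equal_operate_r : Prop := ∀ (grid : List (List Int)), Dom_operate_r grid → Spec_operate_r grid (operate_r grid)

-- ===== LEMMAS AND PROOFS =====

-- sorted2 with Int keys is sorted with the lexicographic pair key
lemma sorted2_eq_sorted_lex {α : Type} (xs : List α) (k1 k2 : α → Int) :
    PySem.List.sorted2 xs k1 k2 false
      = PySem.List.sorted xs (fun x => toLex (k1 x, k2 x)) false := by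
  unfold PySem.List.sorted2 PySem.List.sorted
  simp only [if_neg, Bool.false_eq_true, not_false_iff]
  have hb : (fun a b => decide (k1 a < k1 b) || (!decide (k1 b < k1 a) && decide (k2 a < k2 b)))
      = (fun a b => decide ((fun x => toLex (k1 x, k2 x)) a < (fun x => toLex (k1 x, k2 x)) b)) := by
    funext a b
    simp only [Prod.Lex.toLex_lt_toLex]
    rcases lt_trichotomy (k1 a) (k1 b) with h | h | h
    · simp [h]
    · simp [h]
    · simp [not_lt_of_gt h, ne_of_gt h]
      intro h'
      omega
  rw [hb]

-- a sorted value v precedes everything in the list and does not survive dropWhile (== v)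
lemma not_mem_dropWhile_sorted (v : Int) (l : List Int)
    (hl : l.Pairwise (· ≤ ·)) (hv : ∀ x ∈ l, v ≤ x) :
    v ∉ l.dropWhile (fun x => x == v) := by
  induction l with
  | nil => simp
  | cons x xs ih =>
    by_cases hx : x = v
    · subst hx
      simp only [List.dropWhile_cons, BEq.rfl, if_pos]
      exact ih hl.of_cons (fun y hy => hv y (List.mem_cons_of_mem _ hy))
    · simp only [List.dropWhile_cons]
      rw [if_neg (by simp [hx])]
      intro hmem
      rcases List.mem_cons.1 hmem with rfl | hmem'
      · exact hx rfl
      · have h1 : x ≤ v := (List.pairwise_cons.1 hl).1 v hmem'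
        have h2 : v ≤ x := hv x (List.mem_cons_self)
        exact hx (le_antisymm h1 h2)

lemma count_takeWhile_self (v : Int) (rest : List Int) :
    (rest.takeWhile (fun x => x == v)).count v = (rest.takeWhile (fun x => x == v)).length := by
  rw [List.count_eq_length]
  intro b hb
  have h := List.mem_takeWhile_imp hb
  simp only [beq_iff_eq] at h
  omega

lemma count_takeWhile_ne (v w : Int) (hw : w ≠ v) (rest : List Int) :
    (rest.takeWhile (fun x => x == v)).count w = 0 := by
  rw [List.count_eq_zero]
  intro hmem
  have h := List.mem_takeWhile_imp hmem
  simp only [beq_iff_eq] at h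
  exact hw h

-- membership in pyRuns of a sorted list: exactly the pairs (value, its count)
lemma mem_pyRuns_sorted (xs : List Int) (hs : xs.Pairwise (· ≤ ·)) (p : Int × Int) :
    p ∈ pyRuns xs ↔ p.1 ∈ xs ∧ p.2 = (xs.count p.1 : Int) := by
  induction xs using pyRuns.induct with
  | case1 => simp [pyRuns]
  | case2 v rest ih =>
    have hv : ∀ x ∈ rest, v ≤ x := (List.pairwise_cons.1 hs).1
    have hd : (rest.dropWhile (fun x => x == v)).Pairwise (· ≤ ·) :=
      hs.of_cons.sublist (List.dropWhile_sublist _)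
    have hvd : v ∉ rest.dropWhile (fun x => x == v) :=
      not_mem_dropWhile_sorted v rest hs.of_cons hv
    have hsplit : rest.takeWhile (fun x => x == v) ++ rest.dropWhile (fun x => x == v) = rest :=
      List.takeWhile_append_dropWhile
    have hrest : rest.count v = (rest.takeWhile (fun x => x == v)).length := by
      conv_lhs => rw [← hsplit]
      rw [List.count_append, count_takeWhile_self, List.count_eq_zero.2 hvd]
      omega
    have hcv : (v :: rest).count v = (rest.takeWhile (fun x => x == v)).length + 1 := by
      rw [List.count_cons_self, hrest]
    have hcd : ∀ w ∈ rest.dropWhile (fun x => x == v),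
        (v :: rest).count w = (rest.dropWhile (fun x => x == v)).count w := by
      intro w hw
      have hwv : w ≠ v := fun h => hvd (h ▸ hw)
      have h1 : (v :: rest).count w = rest.count w := by
        simp [Ne.symm hwv]
      have h2 : rest.count w = (rest.dropWhile (fun x => x == v)).count w := by
        conv_lhs => rw [← hsplit]
        rw [List.count_append, count_takeWhile_ne v w hwv]
        omega
      omega
    rw [pyRuns]
    constructor
    · intro hmem
      rcases List.mem_cons.1 hmem with rfl | hmem'
      · exact ⟨List.mem_cons_self, by simp [hcv]⟩
      · rcases (ih hd).1 hmem' with ⟨h1, h2⟩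
        exact ⟨List.mem_cons_of_mem _ ((List.dropWhile_sublist _).subset h1),
          by rw [h2, hcd p.1 h1]⟩
    · rintro ⟨h1, h2⟩
      by_cases hp : p.1 = v
      · have hp2 : p.2 = ((rest.takeWhile (fun x => x == v)).length : Int) + 1 := by
          rw [h2, hp, hcv]; push_cast; ring
        have hpv : p = (v, ((rest.takeWhile (fun x => x == v)).length : Int) + 1) :=
          Prod.ext hp hp2
        exact hpv ▸ List.mem_cons_self
      · rcases List.mem_cons.1 h1 with h | h
        · exact absurd h hp
        · have hmemd : p.1 ∈ rest.dropWhile (fun x => x == v) := by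
            rw [← hsplit] at h
            rcases List.mem_append.1 h with h' | h'
            · exact absurd (by simpa using List.mem_takeWhile_imp h') hp
            · exact h'
          exact List.mem_cons_of_mem _
            ((ih hd).2 ⟨hmemd, by rw [h2, hcd p.1 hmemd]⟩)

lemma pyRuns_fst_nodup (xs : List Int) (hs : xs.Pairwise (· ≤ ·)) :
    ((pyRuns xs).map Prod.fst).Nodup := by
  induction xs using pyRuns.induct with
  | case1 => simp [pyRuns]
  | case2 v rest ih =>
    have hv : ∀ x ∈ rest, v ≤ x := (List.pairwise_cons.1 hs).1
    have hd : (rest.dropWhile (fun x => x == v)).Pairwise (· ≤ ·) :=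
      hs.of_cons.sublist (List.dropWhile_sublist _)
    have hvd : v ∉ rest.dropWhile (fun x => x == v) :=
      not_mem_dropWhile_sorted v rest hs.of_cons hv
    rw [pyRuns]
    simp only [List.map_cons, List.nodup_cons]
    refine ⟨?_, ih hd⟩
    intro hmem
    rcases List.mem_map.1 hmem with ⟨p, hp, hfst⟩
    have := (mem_pyRuns_sorted _ hd p).1 hp
    exact hvd (hfst ▸ this.1)

-- the sorted (count, value) pair lists of the two row strategies coincide
lemma sorted_pairs_eq (nz : List Int) :
    PySem.List.sorted2 (PySem.Dict.counter nz).items (fun x => x.2) (fun x => x.1) false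
      = PySem.List.sorted2 (pyRuns (PySem.List.sorted nz (fun x => x) false))
          (fun p => p.2) (fun p => p.1) false := by
  rw [sorted2_eq_sorted_lex, sorted2_eq_sorted_lex, PySem.Dict.items_counter]
  set s := PySem.List.sorted nz (fun x => x) false with hsdef
  have hsorted : s.Pairwise (· ≤ ·) := by
    have := PySem.List.sorted_pairwise nz (fun x => x)
    simpa using this
  have hperm : s.Perm nz := PySem.List.sorted_perm nz (fun x => x) false
  apply PySem.List.sorted_eq_sorted_of_perm
  · intro p q h
    have h' := toLex.injective h
    simp only [Prod.mk.injEq] at h'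
    exact Prod.ext h'.2 h'.1
  · have hA : ((PySem.Set.ofList nz).map (fun k => (k, (List.count k nz : Int)))).Nodup := by
      refine (PySem.Set.nodup_ofList nz).map ?_
      intro a b h
      simpa using congrArg Prod.fst h
    have hB : (pyRuns s).Nodup := (pyRuns_fst_nodup s hsorted).of_map
    rw [List.perm_ext_iff_of_nodup hA hB]
    intro p
    rw [mem_pyRuns_sorted s hsorted p]
    constructor
    · intro hmem
      rcases List.mem_map.1 hmem with ⟨k, hk, rfl⟩
      have hk' : k ∈ nz := (PySem.Set.mem_ofList nz k).1 hk
      exact ⟨hperm.mem_iff.2 hk', by rw [hperm.count_eq]⟩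
    · rintro ⟨h1, h2⟩
      refine List.mem_map.2 ⟨p.1, (PySem.Set.mem_ofList nz p.1).2 (hperm.mem_iff.1 h1), ?_⟩
      rw [hperm.count_eq] at h2
      exact (Prod.ext rfl h2.symm)

-- A's inner row computation equals B's rowTransform
lemma rowA_eq (row : List Int) :
    (PySem.List.sorted2 (PySem.Dict.counter (row.filter (fun num => num != 0))).items
        (fun x => x.2) (fun x => x.1) false).foldl
      (fun acc p => acc ++ [p.1, p.2]) ([] : List Int) = rowTransform row := by
  rw [PySem.List.foldl_append_eq_flatMap (g := fun p : Int × Int => [p.1, p.2]),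
    sorted_pairs_eq, rowTransform]
  simp

-- the while-append padding is an append of replicated zeros
lemma padTo_eq (row : List Int) (m : Int) :
    padTo row m = row ++ List.replicate (m - PySem.List.len row).toNat 0 := by
  induction row using padTo.induct (m := m) with
  | case1 row h ih =>
    rw [padTo, if_pos h, ih]
    simp only [PySem.List.len_eq, List.length_append, List.length_cons, List.length_nil] at h ⊢
    have hk : (m - (row.length : Int)).toNat = (m - ((row.length : Int) + 1)).toNat + 1 := by
      omega
    rw [hk, List.replicate_succ, List.append_assoc]
    norm_num
  | case2 row h =>
    rw [padTo, if_neg h]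
    simp only [PySem.List.len_eq] at h ⊢
    have h0 : (m - (row.length : Int)).toNat = 0 := by omega
    simp [h0]

-- ===== VERDICT (by name: the statement is the Claim_ definition above) =====
theorem operate_r_spec : Claim_equal_operate_r := by
  intro grid _
  show operate_r grid = operate_r_alt grid
  rw [operate_r, operate_r_alt]
  simp only [rowA_eq]
  rw [PySem.List.foldl_prod_mk
    (f := fun m row => max m (PySem.List.len (rowTransform row)))
    (g := fun acc row => acc ++ [rowTransform row])]
  rw [PySem.List.foldl_append_singleton_eq_map (f := rowTransform)]
  simp only [List.nil_append, List.map_map, List.foldl_map, padTo_eq, Function.comp_def]
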